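-- pv_equiv track=rewrite | github.com/Karimchmtz/leetcode | src/SubProductAndSum.py | subtractProductAndSum
-- ===== SOURCE A (Python) =====
-- def subtractProductAndSum(n: int) -> int:
--
--     def getdigits(n: int) -> list[int]:
--         if (n == 0):
--             return [0]
--         res = []
--         while(n >= 10):
--             nextDigit = n % 10
--             n = n // 10
--             res.append(nextDigit)
--         res.append(n)
--         return res
--
--     digits = getdigits(n)
--     product, summ = 1, 0
--     for elm in digits:
--         product *= elm
--         summ += elm
--
--     return product - summ
-- ===== SOURCE B (Python) =====
-- def subtractProductAndSum(n: int) -> int: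
--     product, summ = 1, 0
--     while n >= 10:
--         d = n % 10
--         n //= 10
--         product *= d
--         summ += d
--     product *= n
--     summ += n
--     return product - summ
-- ===== Notes on version B (the rewrite author's own statement) =====
-- stated objective: simpler
-- what changed: Drops the getdigits helper and the intermediate digit list: one fused loop accumulates product and sum directly while peeling digits (no n==0 special case needed since product*0 = 0 anyway).
import Mathlib
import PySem

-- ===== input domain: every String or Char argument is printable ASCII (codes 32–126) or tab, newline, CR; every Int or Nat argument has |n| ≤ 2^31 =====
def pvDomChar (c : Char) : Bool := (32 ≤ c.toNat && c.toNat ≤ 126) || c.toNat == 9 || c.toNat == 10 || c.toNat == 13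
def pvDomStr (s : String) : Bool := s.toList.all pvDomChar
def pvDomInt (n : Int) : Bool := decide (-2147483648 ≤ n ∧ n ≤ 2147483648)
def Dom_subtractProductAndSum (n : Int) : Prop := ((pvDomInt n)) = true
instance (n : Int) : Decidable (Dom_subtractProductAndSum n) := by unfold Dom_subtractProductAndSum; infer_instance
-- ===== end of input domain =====

-- B change: drops the getdigits helper and the intermediate digit list, fusing product/sum into one loop (objective: simpler).

-- ===== PORT A =====
-- while(n >= 10): res.append(n % 10); n //= 10 — then res.append(n)
def pvGetdigitsLoop (n : Int) (res : List Int) : List Int :=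
  if 10 ≤ n then
    pvGetdigitsLoop (PySem.Int.floordiv n 10) (res ++ [PySem.Int.mod n 10])
  else res ++ [n]
termination_by n.toNat
decreasing_by
  rw [PySem.Int.floordiv_eq_ediv_of_pos (by norm_num)]
  omega

def pvGetdigits (n : Int) : List Int :=
  if n = 0 then [0] else pvGetdigitsLoop n []

def subtractProductAndSum (n : Int) : Int :=
  let ps := (pvGetdigits n).foldl (fun (ps : Int × Int) elm => (ps.1 * elm, ps.2 + elm)) (1, 0)
  ps.1 - ps.2

-- ===== PORT B =====
def pvAltLoop (n product summ : Int) : Int × Int :=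
  if 10 ≤ n then
    pvAltLoop (PySem.Int.floordiv n 10) (product * PySem.Int.mod n 10) (summ + PySem.Int.mod n 10)
  else (product * n, summ + n)
termination_by n.toNat
decreasing_by
  rw [PySem.Int.floordiv_eq_ediv_of_pos (by norm_num)]
  omega

def subtractProductAndSum_alt (n : Int) : Int :=
  let ps := pvAltLoop n 1 0
  ps.1 - ps.2

-- ===== PRECONDITION & SPEC =====
def Spec_subtractProductAndSum (n : Int) (out : Int) : Prop := out = subtractProductAndSum_alt n
instance (n : Int) (out : Int) : Decidable (Spec_subtractProductAndSum n out) := by unfold Spec_subtractProductAndSum; infer_instance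

-- ===== CLAIM (what is proved, stated in full; the proofs are below) =====
def Claim_equal_subtractProductAndSum : Prop := ∀ (n : Int), Dom_subtractProductAndSum n → Spec_subtractProductAndSum n (subtractProductAndSum n)

-- ===== LEMMAS AND PROOFS =====

theorem getdigitsLoop_fold (n : Int) (res : List Int) (init : Int × Int) :
    (pvGetdigitsLoop n res).foldl (fun (ps : Int × Int) elm => (ps.1 * elm, ps.2 + elm)) init
      = (fun acc => pvAltLoop n acc.1 acc.2)
          (res.foldl (fun (ps : Int × Int) elm => (ps.1 * elm, ps.2 + elm)) init) := by
  induction n, res using pvGetdigitsLoop.induct generalizing init with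
  | case1 n res h ih =>
      rw [pvGetdigitsLoop, if_pos h, ih]
      simp only [List.foldl_append, List.foldl_cons, List.foldl_nil]
      conv_rhs => rw [pvAltLoop, if_pos h]
  | case2 n res h =>
      rw [pvGetdigitsLoop, if_neg h]
      simp only [List.foldl_append, List.foldl_cons, List.foldl_nil]
      conv_rhs => rw [pvAltLoop, if_neg h]

-- ===== VERDICT (by name: the statement is the Claim_ definition above) =====
theorem subtractProductAndSum_spec : Claim_equal_subtractProductAndSum := by
  intro n _
  show subtractProductAndSum n = subtractProductAndSum_alt n
  unfold subtractProductAndSum subtractProductAndSum_alt pvGetdigits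
  by_cases h0 : n = 0
  · subst h0
    rw [if_pos rfl, pvAltLoop, if_neg (by norm_num)]
    norm_num
  · rw [if_neg h0, getdigitsLoop_fold]
    simp
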